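-- pv_equiv track=rewrite | github.com/Hmbown/knightsradiant | profiles/knights-radiant/patch-profile-config.py | ensure_section
-- ===== SOURCE A (Python) =====
-- def is_top_level_key(line: str) -> bool:
--     stripped = line.strip()
--     return bool(stripped) and not line.startswith((' ', '\t', '#')) and not stripped.startswith('- ')
--
-- def next_top_level_index(lines: list[str], start: int) -> int:
--     for idx in range(start, len(lines)):
--         if is_top_level_key(lines[idx]):
--             return idx
--     return len(lines)
--
-- def ensure_section(lines: list[str], name: str) -> tuple[int, int]:
--     header = f'{name}:'
--     for idx, line in enumerate(lines):
--         if line == header: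
--             return idx, next_top_level_index(lines, idx + 1)
--     if lines and lines[-1] != '':
--         lines.append('')
--     lines.append(header)
--     idx = len(lines) - 1
--     return idx, len(lines)
-- ===== SOURCE B (Python) =====
-- def ensure_section(lines, name):
--     header = f'{name}:'
--     # single backward pass: `nxt` is the index of the nearest top-level key at or
--     # after i+1 (len(lines) if none); each header occurrence seen further left
--     # overwrites `found`, so the first occurrence wins without any rescan.
--     found = None
--     nxt = len(lines)
--     for i in range(len(lines) - 1, -1, -1):
--         ln = lines[i]
--         if ln == header:
--             found = (i, nxt)
--         s = ln.strip()
--         if s and not ln.startswith((' ', '\t', '#')) and not s.startswith('- '):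
--             nxt = i
--     if found is not None:
--         return found
--     if lines and lines[-1] != '':
--         lines.append('')
--     lines.append(header)
--     return len(lines) - 1, len(lines)
-- ===== Notes on version B (the rewrite author's own statement) =====
-- stated objective: alternative
-- what changed: B does one backward pass keeping a 'nearest top-level key to the right' accumulator and overwriting the answer for each header occurrence (so the first occurrence wins), instead of A's forward find-header followed by a second forward rescan for the section end.
import Mathlib
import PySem

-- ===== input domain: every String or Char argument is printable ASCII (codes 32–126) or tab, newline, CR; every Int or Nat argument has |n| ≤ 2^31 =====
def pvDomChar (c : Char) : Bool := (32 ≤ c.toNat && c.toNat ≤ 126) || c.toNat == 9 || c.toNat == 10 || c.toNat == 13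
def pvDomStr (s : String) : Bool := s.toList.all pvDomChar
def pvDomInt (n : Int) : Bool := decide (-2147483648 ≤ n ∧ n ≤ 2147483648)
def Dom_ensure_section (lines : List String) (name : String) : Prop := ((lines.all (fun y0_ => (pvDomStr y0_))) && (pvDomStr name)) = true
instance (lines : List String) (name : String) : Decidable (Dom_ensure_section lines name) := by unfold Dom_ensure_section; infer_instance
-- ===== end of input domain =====

-- B replaces A's forward find-header-then-rescan with ONE backward pass carrying a
-- 'nearest top-level key to the right' accumulator; equivalence is about the RETURN
-- value only (both Pythons perform the same append mutation on the not-found path).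

-- ===== PORT A =====
def is_top_level_key (line : String) : Bool :=
  let stripped := PySem.Str.strip line
  !(stripped == "") &&
    !(PySem.Str.startswith line " " || PySem.Str.startswith line "\t" || PySem.Str.startswith line "#") &&
    !(PySem.Str.startswith stripped "- ")

def next_top_level_index (lines : List String) (start : Int) : Int :=
  match (PySem.List.pyRange start (PySem.List.len lines) 1).find?
      (fun idx => is_top_level_key (PySem.List.pyGetD lines idx "")) with
  | some i => i
  | none => PySem.List.len lines

def ensure_section (lines : List String) (name : String) : Int × Int :=
  -- header = name + ':' is inlined below (a Lean `let` would block the proofs' rewrites)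
  match (PySem.List.enumerate lines 0).find? (fun p => p.2 == name ++ ":") with
  | some p => (p.1, next_top_level_index lines (p.1 + 1))
  | none =>
    (PySem.List.len ((if !lines.isEmpty && !(PySem.List.pyGetD lines (-1) "" == "") then lines ++ [""] else lines) ++ [name ++ ":"]) - 1,
     PySem.List.len ((if !lines.isEmpty && !(PySem.List.pyGetD lines (-1) "" == "") then lines ++ [""] else lines) ++ [name ++ ":"]))

-- ===== PORT B =====
-- the backward `for i in range(len(lines)-1, -1, -1)` loop of Source B: structural
-- recursion that first computes (nxt, found) for the suffix starting at index i+1,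
-- then processes line i exactly as the loop body does (header test with the current
-- nxt, then the inlined top-level test updating nxt)
def bscan (header : String) : List String → Int → Int × Option (Int × Int)
  | [], i => (i, none)
  | ln :: t, i =>
    let r := bscan header t (i + 1)
    ((if !(PySem.Str.strip ln == "") &&
          !(PySem.Str.startswith ln " " || PySem.Str.startswith ln "\t" || PySem.Str.startswith ln "#") &&
          !(PySem.Str.startswith (PySem.Str.strip ln) "- ")
        then i else r.1),
     (if ln == header then some (i, r.1) else r.2))

def ensure_section_alt (lines : List String) (name : String) : Int × Int :=
  match (bscan (name ++ ":") lines 0).2 with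
  | some p => p
  | none =>
    (PySem.List.len ((if !lines.isEmpty && !(PySem.List.pyGetD lines (-1) "" == "") then lines ++ [""] else lines) ++ [name ++ ":"]) - 1,
     PySem.List.len ((if !lines.isEmpty && !(PySem.List.pyGetD lines (-1) "" == "") then lines ++ [""] else lines) ++ [name ++ ":"]))

-- ===== PRECONDITION & SPEC =====
def Spec_ensure_section (lines : List String) (name : String) (out : Int × Int) : Prop := out = ensure_section_alt lines name
instance (lines : List String) (name : String) (out : Int × Int) : Decidable (Spec_ensure_section lines name out) := by unfold Spec_ensure_section; infer_instance

-- ===== CLAIM (what is proved, stated in full; the proofs are below) =====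
def Claim_equal_ensure_section : Prop := ∀ (lines : List String) (name : String), Dom_ensure_section lines name → Spec_ensure_section lines name (ensure_section lines name)

-- ===== LEMMAS AND PROOFS =====

-- structural 'first top-level index in this suffix, else end index' used to
-- characterise both A's rescan and B's accumulator
def nextSpec : List String → Int → Int
  | [], i => i
  | x :: t, i => if is_top_level_key x then i else nextSpec t (i + 1)

theorem bscan_spec (h : String) (l : List String) (i : Int) :
    bscan h l i = (nextSpec l i,
      (PySem.List.index? l h).map
        (fun (k : Nat) => (i + (k : Int), nextSpec (l.drop (k + 1)) (i + (k : Int) + 1)))) := by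
  induction l generalizing i with
  | nil => simp [bscan, nextSpec, PySem.List.index?]
  | cons x t ih =>
    by_cases hx : x = h
    · subst hx
      rw [PySem.List.index?_cons_self]
      simp [bscan, ih, nextSpec, is_top_level_key]
    · rw [PySem.List.index?_cons_of_ne t hx]
      have hxb : (x == h) = false := by simpa using hx
      cases hk : PySem.List.index? t h with
      | none =>
        have hmem : h ∉ t := by
          simpa [PySem.List.index?_eq_none_iff] using hk
        simp [bscan, ih, nextSpec, is_top_level_key, hxb, hk, hmem]
      | some k =>
        simp only [bscan, ih, hk, Option.map_some,
          List.drop_succ_cons, hxb, Bool.false_eq_true, if_false, Prod.mk.injEq]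
        refine ⟨by simp [nextSpec, is_top_level_key], ?_⟩
        push_cast
        ring_nf

theorem find_enumerate_eq (xs : List String) (h : String) (s : Int) :
    (PySem.List.enumerate xs s).find? (fun p => p.2 == h) =
      (PySem.List.index? xs h).map (fun k => (s + (k : Int), h)) := by
  induction xs generalizing s with
  | nil => simp [PySem.List.enumerate, PySem.List.index?]
  | cons x t ih =>
    rw [PySem.List.enumerate_cons]
    by_cases hx : x = h
    · subst hx
      rw [PySem.List.index?_cons_self]
      simp [List.find?]
    · rw [PySem.List.index?_cons_of_ne t hx]
      have hxb : (x == h) = false := by simpa using hx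
      simp only [List.find?, hxb]
      rw [ih (s + 1)]
      cases PySem.List.index? t h with
      | none => simp
      | some k => simp; ring

theorem next_top_eq_nextSpec (l : List String) :
    ∀ (d : List String) (s : Nat), l.drop s = d → s ≤ l.length →
      next_top_level_index l (s : Int) = nextSpec d (s : Int) := by
  intro d
  induction d with
  | nil =>
    intro s hd hs
    have hlen : l.length ≤ s := List.drop_eq_nil_iff.mp hd
    have hse : s = l.length := le_antisymm hs hlen
    subst hse
    unfold next_top_level_index
    rw [PySem.List.pyRange_one_eq_nil (by simp [PySem.List.len_eq])]
    simp [nextSpec, PySem.List.len_eq]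
  | cons x d' ih =>
    intro s hd hs
    have hlt : s < l.length := by
      rcases Nat.lt_or_ge s l.length with hl | hge
      · exact hl
      · rw [List.drop_eq_nil_iff.mpr hge] at hd; simp at hd
    have hx : l[s]? = some x := by
      have h0 : (l.drop s)[0]? = some x := by rw [hd]; rfl
      rw [List.getElem?_drop] at h0
      simpa using h0
    have hd' : l.drop (s + 1) = d' := by
      rw [← List.drop_drop, hd]
      rfl
    have hget : PySem.List.pyGetD l (s : Int) "" = x := by
      rw [PySem.List.pyGetD_natCast]
      simp [List.getD, hx]
    unfold next_top_level_index
    rw [PySem.List.pyRange_one_cons (by simp [PySem.List.len_eq]; exact_mod_cast hlt)]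
    by_cases htop : is_top_level_key x
    · rw [List.find?_cons_of_pos (by simp [hget, htop])]
      simp [nextSpec, htop]
    · rw [List.find?_cons_of_neg (by simp [hget, htop])]
      have hcast : ((s : Int) + 1) = ((s + 1 : Nat) : Int) := by push_cast; ring
      have hrec := ih (s + 1) hd' (by omega)
      unfold next_top_level_index at hrec
      simp only [nextSpec, if_neg htop]
      rw [hcast]
      exact hrec

-- ===== VERDICT (by name: the statement is the Claim_ definition above) =====
theorem ensure_section_spec : Claim_equal_ensure_section := by
  intro lines name _
  unfold Spec_ensure_section ensure_section ensure_section_alt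
  rw [find_enumerate_eq lines (name ++ ":") 0, bscan_spec]
  cases hk : PySem.List.index? lines (name ++ ":") with
  | none => rfl
  | some k =>
    obtain ⟨hklen, -, -⟩ := PySem.List.getElem_of_index?_eq_some hk
    simp only [Option.pure_def, Option.bind_eq_bind, Option.bind_some, Option.map_some, zero_add]
    have hnext : next_top_level_index lines ((k : Int) + 1) =
        nextSpec (lines.drop (k + 1)) ((k : Int) + 1) := by
      have h := next_top_eq_nextSpec lines (lines.drop (k + 1)) (k + 1) rfl (by omega)
      push_cast at h
      exact h
    rw [hnext]
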